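-- pv_equiv track=rewrite | github.com/Dae-yangKim/BOJ | 7/2885.py | solution
-- ===== SOURCE A (Python) =====
-- def solution(K : int) -> tuple:
--     num : int = 1
--
--     while True:
--         if num >= K:
--             break
--         num = num * 2
--
--     min_num : int = num
--     count : int = 0
--
--     while True:
--
--             if K % num == 0:
--                 break
--
--             num = num // 2
--             count += 1
--
--     return (min_num , count)
-- ===== SOURCE B (Python) =====
-- def solution(K : int) -> tuple:
--     # closed-form bit arithmetic instead of A's two while-loops
--     if K <= 1:
--         return (1, 0)
--     e = (K - 1).bit_length()          # smallest e with 2**e >= K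
--     v = (K & -K).bit_length() - 1     # 2-adic valuation of K
--     return (1 << e, e - v)
-- ===== Notes on version B (the rewrite author's own statement) =====
-- stated objective: alternative
-- what changed: Both while-loops (doubling to the first power of two >= K, then halving until it divides K) are replaced by closed-form bit arithmetic: bit_length gives the exponent of the smallest power of two >= K, and K & -K gives the largest power of two dividing K.
import Mathlib
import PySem

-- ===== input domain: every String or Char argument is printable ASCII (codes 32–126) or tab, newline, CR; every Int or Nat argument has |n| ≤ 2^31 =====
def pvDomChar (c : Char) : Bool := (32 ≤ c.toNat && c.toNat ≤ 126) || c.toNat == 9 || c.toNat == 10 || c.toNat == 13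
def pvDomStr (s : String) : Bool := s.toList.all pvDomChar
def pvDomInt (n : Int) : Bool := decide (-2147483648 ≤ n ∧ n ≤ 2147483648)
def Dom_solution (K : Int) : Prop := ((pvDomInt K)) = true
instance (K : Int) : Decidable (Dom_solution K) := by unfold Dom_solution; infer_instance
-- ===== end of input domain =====

-- B replaces A's two while-loops by closed-form bit arithmetic (bit_length and K & -K); return values agree on the whole domain.

-- ===== PORT A =====
-- A's first while-loop: double num until num >= K (the fuel only makes the loop total; 64 always suffices on Dom).
def solLoop1 (K : Int) : Nat → Int → Int
  | 0, num => num
  | fuel+1, num => if num ≥ K then num else solLoop1 K fuel (num * 2)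

-- A's second while-loop: halve num until K % num == 0, counting steps.
def solLoop2 (K : Int) : Nat → Int → Int → Int
  | 0, _, count => count
  | fuel+1, num, count =>
      if PySem.Int.mod K num = 0 then count
      else solLoop2 K fuel (PySem.Int.floordiv num 2) (count + 1)

def solution (K : Int) : Int × Int :=
  let min_num := solLoop1 K 64 1
  (min_num, solLoop2 K 64 min_num 0)

-- ===== PORT B =====
def solution_alt (K : Int) : Int × Int :=
  if K ≤ 1 then (1, 0)
  else
    let e := PySem.Int.bitLength (K - 1)
    let v := PySem.Int.bitLength (PySem.Int.band K (-K)) - 1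
    ((1 : Int) <<< e, (e : Int) - (v : Int))

-- ===== PRECONDITION & SPEC =====
def Spec_solution (K : Int) (out : Int × Int) : Prop := out = solution_alt K
instance (K : Int) (out : Int × Int) : Decidable (Spec_solution K out) := by unfold Spec_solution; infer_instance

-- ===== CLAIM (what is proved, stated in full; the proofs are below) =====
def Claim_equal_solution : Prop := ∀ (K : Int), Dom_solution K → Spec_solution K (solution K)

-- ===== LEMMAS AND PROOFS =====

lemma bitLength_le_iff (n : Int) (hn : n ≠ 0) (j : Nat) :
    PySem.Int.bitLength n ≤ j ↔ n.natAbs < 2 ^ j := by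
  constructor
  · intro h
    exact lt_of_lt_of_le (PySem.Int.lt_two_pow_bitLength n) (Nat.pow_le_pow_right (by norm_num) h)
  · intro h
    by_contra hc
    push_neg at hc
    have h1 := PySem.Int.two_pow_bitLength_le n hn
    have h2 : 2 ^ j ≤ 2 ^ (PySem.Int.bitLength n - 1) :=
      Nat.pow_le_pow_right (by norm_num) (by omega)
    omega

lemma bitLength_two_pow (v : Nat) :
    PySem.Int.bitLength ((2 ^ v : Nat) : Int) = v + 1 := by
  have h1 := PySem.Int.lt_two_pow_bitLength ((2 ^ v : Nat) : Int)
  have h2 := PySem.Int.two_pow_bitLength_le ((2 ^ v : Nat) : Int) (by positivity)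
  simp only [Int.natAbs_natCast] at h1 h2
  have hlt : v < PySem.Int.bitLength ((2 ^ v : Nat) : Int) :=
    (Nat.pow_lt_pow_iff_right (by norm_num)).1 h1
  have hle : PySem.Int.bitLength ((2 ^ v : Nat) : Int) - 1 ≤ v :=
    (Nat.pow_le_pow_iff_right (by norm_num)).1 h2
  omega

lemma and_two_mul (a : Nat) (ha : 1 ≤ a) : (2*a) &&& (2*a-1) = 2*(a &&& (a-1)) := by
  apply Nat.eq_of_testBit_eq
  intro i
  have h1 : (2*a)/2 = a := by omega
  have h2 : (2*a-1)/2 = a-1 := by omega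
  have h3 : (2*(a &&& (a-1)))/2 = a &&& (a-1) := by omega
  rw [Nat.testBit_and]
  rcases i with _ | i
  · simp [Nat.testBit_zero]
  · simp only [Nat.testBit_succ, h1, h2, h3, Nat.testBit_and]

lemma and_odd (a : Nat) : (2*a+1) &&& (2*a) = 2*a := by
  apply Nat.eq_of_testBit_eq
  intro i
  have h1 : (2*a)/2 = a := by omega
  have h2 : (2*a+1)/2 = a := by omega
  rw [Nat.testBit_and]
  rcases i with _ | i
  · simp [Nat.testBit_zero]
  · simp only [Nat.testBit_succ, h1, h2, Bool.and_self]

-- clearing the lowest set bit: k &&& (k-1) plus the lowest power of two gives back k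
lemma and_pred_add (k : Nat) (hk : 0 < k) :
    (k &&& (k - 1)) + 2 ^ (padicValNat 2 k) = k := by
  induction k using Nat.strong_induction_on with
  | _ k ih =>
    rcases Nat.even_or_odd k with ⟨a, ha⟩ | ⟨a, ha⟩
    · have ha' : k = 2*a := by omega
      have ha1 : 1 ≤ a := by omega
      have hIH := ih a (by omega) (by omega)
      have hval : padicValNat 2 (2*a) = padicValNat 2 a + 1 := by
        rw [padicValNat.mul (p := 2) (by norm_num) (by omega), padicValNat.self (by norm_num)]
        omega
      rw [ha', hval, and_two_mul a ha1, pow_succ]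
      omega
    · have hval : padicValNat 2 k = 0 := padicValNat.eq_zero_of_not_dvd (by omega)
      have hand : k &&& (k-1) = 2*a := by
        have := and_odd a; rw [ha]; simpa using this
      rw [hval, hand]; omega

lemma band_self_neg (K : Int) (hK : 0 < K) :
    PySem.Int.band K (-K) = ((2 ^ (padicValNat 2 K.toNat) : Nat) : Int) := by
  have h1 : ¬ (0 ≤ -K) := by omega
  have h2 : (0 : Int) ≤ K := by omega
  have h3 : (-(-K) - 1).toNat = K.toNat - 1 := by omega
  rw [PySem.Int.band, if_pos h2, if_neg h1, h3]
  have h4 := and_pred_add K.toNat (by omega)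
  have h5 : K.toNat - (K.toNat &&& (K.toNat - 1)) = 2 ^ (padicValNat 2 K.toNat) := by
    generalize hb : (K.toNat &&& (K.toNat - 1)) = b at h4 ⊢
    generalize hc : 2 ^ padicValNat 2 K.toNat = c at h4 ⊢
    omega
  exact congrArg _ h5

lemma pow_dvd_iff_le_val (K : Int) (hK : 0 < K) (e : Nat) :
    ((2 : Int) ^ e ∣ K) ↔ e ≤ padicValNat 2 K.toNat := by
  obtain ⟨k, rfl⟩ : ∃ k : Nat, K = (k : Int) := ⟨K.toNat, by omega⟩
  simp only [Int.toNat_natCast]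
  rw [show ((2:Int)^e) = ((2^e : Nat) : Int) by push_cast; ring, Int.natCast_dvd_natCast,
      ← Nat.factorization_def k (by norm_num : Nat.Prime 2)]
  exact (Nat.Prime.pow_dvd_iff_le_factorization (by norm_num) (by exact_mod_cast hK.ne'))

lemma loop1_eq (K : Int) (hK : 2 ≤ K) :
    ∀ (fuel j : Nat), PySem.Int.bitLength (K - 1) ≤ j + fuel →
      solLoop1 K fuel ((2 ^ j : Nat) : Int) =
        ((2 ^ (max j (PySem.Int.bitLength (K - 1))) : Nat) : Int) := by
  intro fuel
  induction fuel with
  | zero =>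
      intro j h
      have : max j (PySem.Int.bitLength (K - 1)) = j := by omega
      rw [this, solLoop1]
  | succ fuel ih =>
      intro j h
      have hiff := bitLength_le_iff (K - 1) (by omega) j
      rw [solLoop1]
      by_cases hge : ((2 ^ j : Nat) : Int) ≥ K
      · have hE : PySem.Int.bitLength (K - 1) ≤ j := by
          rw [hiff]; omega
        have : max j (PySem.Int.bitLength (K - 1)) = j := by omega
        rw [if_pos hge, this]
      · have hE : j < PySem.Int.bitLength (K - 1) := by
          by_contra hc
          push_neg at hc
          rw [hiff] at hc
          omega
        rw [if_neg hge, show ((2 ^ j : Nat) : Int) * 2 = ((2 ^ (j+1) : Nat) : Int) by push_cast; ring,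
            ih (j+1) (by omega), show max (j+1) (PySem.Int.bitLength (K - 1)) = max j (PySem.Int.bitLength (K - 1)) by omega]

lemma loop2_eq (K : Int) (hK : 2 ≤ K) :
    ∀ (fuel e : Nat) (count : Int), padicValNat 2 K.toNat ≤ e →
      e ≤ padicValNat 2 K.toNat + fuel →
      solLoop2 K fuel ((2 ^ e : Nat) : Int) count =
        count + ((e - padicValNat 2 K.toNat : Nat) : Int) := by
  intro fuel
  induction fuel with
  | zero =>
      intro e count h1 h2
      have : e = padicValNat 2 K.toNat := by omega
      rw [solLoop2, this]
      simp
  | succ fuel ih =>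
      intro e count h1 h2
      have hmod : PySem.Int.mod K ((2 ^ e : Nat) : Int) = 0 ↔ e ≤ padicValNat 2 K.toNat := by
        rw [PySem.Int.mod_eq_zero_iff_dvd,
            show ((2 ^ e : Nat) : Int) = (2:Int)^e by push_cast; ring,
            pow_dvd_iff_le_val K (by omega) e]
      rw [solLoop2]
      by_cases hz : e = padicValNat 2 K.toNat
      · rw [if_pos (hmod.2 (by omega)), hz]
        simp
      · have he1 : 1 ≤ e := by omega
        rw [if_neg (by rw [hmod]; omega),
            show PySem.Int.floordiv ((2 ^ e : Nat) : Int) 2 = ((2 ^ (e-1) : Nat) : Int) by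
              rw [show ((2:Int)) = ((2:Nat):Int) by norm_num, PySem.Int.floordiv_natCast]
              congr 1
              have : 2^e = 2 * 2^(e-1) := by rw [← pow_succ']; congr 1; omega
              omega,
            ih (e-1) (count+1) (by omega) (by omega)]
        omega

-- ===== VERDICT (by name: the statement is the Claim_ definition above) =====
theorem solution_spec : Claim_equal_solution := by
  intro K hdom
  unfold Spec_solution
  have hA : solution K = (solLoop1 K 64 1, solLoop2 K 64 (solLoop1 K 64 1) 0) := rfl
  have hdom' : -2147483648 ≤ K ∧ K ≤ 2147483648 := by
    simpa [Dom_solution, pvDomInt] using hdom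
  rw [hA]
  by_cases hK1 : K ≤ 1
  · have l1 : solLoop1 K 64 1 = 1 := by
      rw [show (64:Nat) = 63 + 1 from rfl, solLoop1, if_pos (by omega)]
    have l2 : solLoop2 K 64 1 0 = 0 := by
      rw [show (64:Nat) = 63 + 1 from rfl, solLoop2,
          if_pos (by rw [PySem.Int.mod_eq_zero_iff_dvd]; exact one_dvd K)]
    simp only [solution_alt, if_pos hK1]
    rw [l1, l2]
  · have hK2 : 2 ≤ K := by omega
    obtain ⟨E, hE⟩ : ∃ E, PySem.Int.bitLength (K - 1) = E := ⟨_, rfl⟩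
    obtain ⟨v, hv⟩ : ∃ v, padicValNat 2 K.toNat = v := ⟨_, rfl⟩
    have hE31 : E ≤ 31 := by
      rw [← hE, bitLength_le_iff (K - 1) (by omega) 31]
      have h31 : (2:Nat)^31 = 2147483648 := by norm_num
      omega
    have hvE : v ≤ E := by
      have hdvd : (2:Nat) ^ v ∣ K.toNat := by rw [← hv]; exact pow_padicValNat_dvd
      have hle : (2:Nat) ^ v ≤ K.toNat := Nat.le_of_dvd (by omega) hdvd
      have hlt := PySem.Int.lt_two_pow_bitLength (K - 1)
      rw [hE] at hlt
      have hpow : (2:Nat) ^ v ≤ 2 ^ E := by omega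
      exact (Nat.pow_le_pow_iff_right (by norm_num : 1 < 2)).1 hpow
    have l1 : solLoop1 K 64 1 = ((2 ^ E : Nat) : Int) := by
      have h := loop1_eq K hK2 64 0 (by rw [hE]; omega)
      rw [hE] at h
      simpa using h
    have l2 : solLoop2 K 64 ((2 ^ E : Nat) : Int) 0 = ((E - v : Nat) : Int) := by
      have h := loop2_eq K hK2 64 E 0 (by rw [hv]; omega) (by rw [hv]; omega)
      rw [hv] at h
      simpa using h
    have hband : PySem.Int.bitLength (PySem.Int.band K (-K)) - 1 = v := by
      rw [band_self_neg K (by omega), hv, bitLength_two_pow]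
      omega
    simp only [solution_alt, if_neg (show ¬ K ≤ 1 by omega)]
    rw [l1, l2, hband, hE]
    refine Prod.ext ?_ ?_
    · rw [Int.shiftLeft_eq, one_mul]
      push_cast
      ring
    · omega
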